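-- pv_equiv track=rewrite | github.com/haolunc/ARC-RL | reference_solutions/solutions/0ca9ddb6.py | transform
-- ===== SOURCE A (Python) =====
-- def transform(grid):
--
--     n = len(grid)
--     m = len(grid[0]) if n else 0
--
--     out = [row[:] for row in grid]
--
--     orthogonal = [(-1, 0), (1, 0), (0, -1), (0, 1)]
--     diagonal   = [(-1, -1), (-1, 1), (1, -1), (1, 1)]
--
--     for r in range(n):
--         for c in range(m):
--             val = grid[r][c]
--             if val == 1:
--                 for dr, dc in orthogonal:
--                     nr, nc = r + dr, c + dc
--                     if 0 <= nr < n and 0 <= nc < m and out[nr][nc] == 0: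
--                         out[nr][nc] = 7
--             elif val == 2:
--                 for dr, dc in diagonal:
--                     nr, nc = r + dr, c + dc
--                     if 0 <= nr < n and 0 <= nc < m and out[nr][nc] == 0:
--                         out[nr][nc] = 4
--     return out
-- ===== SOURCE B (Python) =====
-- def _candidate(grid, n, m, r, c):
--     # scan the 3x3 neighborhood in row-major order; the first qualifying
--     # source is the one with the smallest row-major index, so it wins
--     for sr in range(r - 1, r + 2):
--         for sc in range(c - 1, c + 2):
--             if 0 <= sr < n and 0 <= sc < m and (sr != r or sc != c):
--                 v = grid[sr][sc]
--                 if v == 1 and (sr == r or sc == c):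
--                     return 7
--                 if v == 2 and sr != r and sc != c:
--                     return 4
--     return 0
--
--
-- def transform(grid):
--     n = len(grid)
--     m = len(grid[0]) if n else 0
--     out = []
--     for r, row in enumerate(grid):
--         new = list(row)
--         for c in range(m):
--             if row[c] == 0:
--                 new[c] = _candidate(grid, n, m, r, c)
--         out.append(new)
--     return out
-- ===== Notes on version B (the rewrite author's own statement) =====
-- stated objective: alternative
-- what changed: B is a gather: instead of A's scatter that pushes 7/4 from each 1/2-source into still-zero neighbor cells of a mutated copy, B computes each originally-zero cell directly by scanning its 3x3 neighborhood in row-major order and taking the first qualifying source (orthogonal 1 -> 7, diagonal 2 -> 4), which is exactly the first writer in A's order.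
import Mathlib
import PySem

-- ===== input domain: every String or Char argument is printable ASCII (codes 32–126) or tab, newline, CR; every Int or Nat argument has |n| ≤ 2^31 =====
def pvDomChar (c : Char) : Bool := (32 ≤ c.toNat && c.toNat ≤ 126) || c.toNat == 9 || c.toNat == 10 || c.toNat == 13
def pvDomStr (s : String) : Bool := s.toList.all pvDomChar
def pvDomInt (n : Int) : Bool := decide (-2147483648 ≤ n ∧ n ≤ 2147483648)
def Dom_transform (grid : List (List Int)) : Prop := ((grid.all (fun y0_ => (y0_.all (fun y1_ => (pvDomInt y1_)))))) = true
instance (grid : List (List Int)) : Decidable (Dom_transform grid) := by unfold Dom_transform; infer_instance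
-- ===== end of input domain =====

-- B re-implements A's scatter (push 7/4 out of each 1/2-source into still-zero cells) as a
-- gather (each originally-zero cell scans its 3x3 neighborhood row-major and takes the first
-- qualifying source); same cost, genuinely different traversal ("alternative").

-- number of columns: len(grid[0]) if grid else 0
def pvM : List (List Int) → Nat
  | [] => 0
  | row :: _ => row.length

-- ===== PORT A =====
-- `out[nr][nc] = v` guarded by `0 <= nr < n and 0 <= nc < m and out[nr][nc] == 0`;
-- getD-indexing is exact here: the guard makes both indices nonnegative and in range
-- (on Pre_ inputs every row has length ≥ m).
def pvWriteA (n m : Nat) (out : List (List Int)) (nr nc : Int) (v : Int) : List (List Int) :=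
  if 0 ≤ nr ∧ nr < (n : Int) ∧ 0 ≤ nc ∧ nc < (m : Int) ∧ (out.getD nr.toNat []).getD nc.toNat 0 = 0 then
    out.set nr.toNat ((out.getD nr.toNat []).set nc.toNat v)
  else out

def pvOrtho : List (Int × Int) := [(-1, 0), (1, 0), (0, -1), (0, 1)]
def pvDiag : List (Int × Int) := [(-1, -1), (-1, 1), (1, -1), (1, 1)]

-- body of the two nested loops of A for a single source cell (r, c)
-- val = grid[r][c] (inlined)
def pvStepA (grid : List (List Int)) (n m : Nat) (out : List (List Int)) (r c : Nat) : List (List Int) :=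
  if (grid.getD r []).getD c 0 = 1 then
    pvOrtho.foldl (fun o d => pvWriteA n m o ((r : Int) + d.1) ((c : Int) + d.2) 7) out
  else if (grid.getD r []).getD c 0 = 2 then
    pvDiag.foldl (fun o d => pvWriteA n m o ((r : Int) + d.1) ((c : Int) + d.2) 4) out
  else out

def transform (grid : List (List Int)) : List (List Int) :=
  let n := grid.length
  let m := pvM grid
  (List.range n).foldl (fun out r =>
    (List.range m).foldl (fun out c => pvStepA grid n m out r c) out) grid

-- ===== PORT B =====
-- the body of B's neighborhood scan for one candidate source (sr, sc) of target (r, c)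
def pvCheckB (grid : List (List Int)) (n m : Nat) (r c sr sc : Int) : Option Int :=
  if 0 ≤ sr ∧ sr < (n : Int) ∧ 0 ≤ sc ∧ sc < (m : Int) ∧ ¬(sr = r ∧ sc = c) then
    -- v = grid[sr][sc] (inlined)
    if (grid.getD sr.toNat []).getD sc.toNat 0 = 1 ∧ (sr = r ∨ sc = c) then some 7
    else if (grid.getD sr.toNat []).getD sc.toNat 0 = 2 ∧ sr ≠ r ∧ sc ≠ c then some 4
    else none
  else none

-- `for sr in range(r-1, r+2): for sc in range(c-1, c+2):` in row-major order
def pvL9 (r c : Int) : List (Int × Int) :=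
  (PySem.List.pyRange (r - 1) (r + 2) 1).flatMap (fun sr =>
    (PySem.List.pyRange (c - 1) (c + 2) 1).map (fun sc => (sr, sc)))

-- Source B's `_candidate`: the early `return` of the double loop is the first match of the scan
def pvCandidate (grid : List (List Int)) (n m : Nat) (r c : Int) : Int :=
  ((pvL9 r c).findSome? (fun p => pvCheckB grid n m r c p.1 p.2)).getD 0

def transform_alt (grid : List (List Int)) : List (List Int) :=
  let n := grid.length
  let m := pvM grid
  (PySem.List.enumerate grid).map (fun p =>
    (List.range m).foldl (fun new c =>
      if p.2.getD c 0 = 0 then new.set c (pvCandidate grid n m p.1 (c : Int)) else new) p.2)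

-- ===== PRECONDITION & SPEC =====
-- Pre_ is exactly A's no-raise condition: A indexes grid[r][c] and out[nr][nc] for all
-- c < len(grid[0]), so it raises IndexError iff some row is shorter than row 0.
def Pre_transform (grid : List (List Int)) : Prop := ∀ row ∈ grid, pvM grid ≤ row.length
instance (grid : List (List Int)) : Decidable (Pre_transform grid) := by unfold Pre_transform; infer_instance
def pvWitness_transform : List (List Int) := [[1, 0, 0], [0, 0, 0], [0, 0, 2]]

def Spec_transform (grid : List (List Int)) (out : List (List Int)) : Prop := out = transform_alt grid
instance (grid : List (List Int)) (out : List (List Int)) : Decidable (Spec_transform grid out) := by unfold Spec_transform; infer_instance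

-- ===== CLAIM (what is proved, stated in full; the proofs are below) =====
def Claim_equal_transform : Prop := ∀ (grid : List (List Int)), Dom_transform grid → Pre_transform grid → Spec_transform grid (transform grid)

-- ===== LEMMAS AND PROOFS =====

-- row-major key of a source cell
def pvKey (m : Nat) (p : Int × Int) : Int := p.1 * (m : Int) + p.2

-- threshold-restricted scan function: only sources with key < k are visible
def pvThr (m : Nat) (k : Int) (f : Int × Int → Option Int) (p : Int × Int) : Option Int :=
  if pvKey m p < k then f p else none

def pvHit (grid : List (List Int)) (n m : Nat) (r c : Nat) (p : Int × Int) : Option Int :=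
  pvCheckB grid n m (r : Int) (c : Int) p.1 p.2

-- value of cell (r, c) after A has processed all sources with row-major key < k
def pvValK (grid : List (List Int)) (n m : Nat) (k : Int) (r c : Nat) : Int :=
  let v := (grid.getD r []).getD c 0
  if v = 0 then ((pvL9 (r : Int) (c : Int)).findSome? (pvThr m k (pvHit grid n m r c))).getD 0 else v

def pvInv (grid : List (List Int)) (n m : Nat) (k : Int) (out : List (List Int)) : Prop :=
  out.length = grid.length ∧
  (∀ i : Nat, (out.getD i []).length = (grid.getD i []).length) ∧
  (∀ r c : Nat, r < n → c < m → (out.getD r []).getD c 0 = pvValK grid n m k r c) ∧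
  (∀ r c : Nat, ¬(r < n ∧ c < m) → (out.getD r []).getD c 0 = (grid.getD r []).getD c 0)

theorem pv_checkB_ne_none {grid : List (List Int)} {n m : Nat} {r c sr sc : Int}
    (h : pvCheckB grid n m r c sr sc ≠ none) :
    0 ≤ sr ∧ sr < (n : Int) ∧ 0 ≤ sc ∧ sc < (m : Int) := by
  unfold pvCheckB at h
  split_ifs at h with h1
  all_goals first | exact ⟨h1.1, h1.2.1, h1.2.2.1, h1.2.2.2.1⟩ | simp at h

theorem pv_L9_eq (r c : Int) :
    pvL9 r c = [(r-1, c-1), (r-1, c), (r-1, c+1), (r, c-1), (r, c), (r, c+1),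
                (r+1, c-1), (r+1, c), (r+1, c+1)] := by
  have h3 : ∀ a : Int, PySem.List.pyRange (a - 1) (a + 2) 1 = [a - 1, a, a + 1] := by
    intro a
    rw [PySem.List.pyRange_one_cons (by omega), PySem.List.pyRange_one_cons (by omega),
        PySem.List.pyRange_one_cons (by omega), PySem.List.pyRange_one_eq_nil (by omega)]
    norm_num
  unfold pvL9
  rw [h3 r, h3 c]
  rfl

theorem pv_findSome?_congr_mem {α β : Type} {f g : α → Option β} {l : List α}
    (h : ∀ x ∈ l, f x = g x) : l.findSome? f = l.findSome? g := by
  induction l with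
  | nil => rfl
  | cons x t ih =>
    simp only [List.findSome?_cons, h x (List.mem_cons_self), ih (fun y hy => h y (List.mem_cons_of_mem _ hy))]

-- Lemma A: no source with key = k contributes, so raising the threshold changes nothing
theorem pv_thr_succ_none {m : Nat} {k : Int} {f : Int × Int → Option Int} {l : List (Int × Int)}
    (h : ∀ x ∈ l, pvKey m x = k → f x = none) :
    l.findSome? (pvThr m (k + 1) f) = l.findSome? (pvThr m k f) := by
  apply pv_findSome?_congr_mem
  intro x hx
  unfold pvThr
  split_ifs with h1 h2 h2
  · rfl
  · have : pvKey m x = k := by omega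
    simp [h x hx this]
  · omega
  · rfl

-- Lemma B1: an already-found first hit (key < k) survives raising the threshold
theorem pv_thr_succ_some {m : Nat} {k : Int} {f : Int × Int → Option Int} {l : List (Int × Int)} {v : Int}
    (hp : l.Pairwise (fun x y => f x ≠ none → f y ≠ none → pvKey m x < pvKey m y))
    (h : l.findSome? (pvThr m k f) = some v) :
    l.findSome? (pvThr m (k + 1) f) = some v := by
  induction l with
  | nil => simp at h
  | cons x t ih =>
    rcases List.pairwise_cons.mp hp with ⟨hx, ht⟩
    simp only [List.findSome?_cons] at h ⊢
    by_cases hfx : f x = none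
    · have hx1 : pvThr m k f x = none := by unfold pvThr; simp [hfx]
      have hx2 : pvThr m (k + 1) f x = none := by unfold pvThr; simp [hfx]
      rw [hx1] at h; rw [hx2]
      exact ih ht h
    · by_cases hk : pvKey m x < k
      · have hx1 : pvThr m k f x = f x := by unfold pvThr; simp [hk]
        have hx2 : pvThr m (k + 1) f x = f x := by
          unfold pvThr; rw [if_pos (show pvKey m x < k + 1 by omega)]
        rw [hx1] at h; rw [hx2]
        cases hfv : f x with
        | none => exact absurd hfv hfx
        | some w => rw [hfv] at h; exact h
      · -- head not yet visible at k; no later hit can have key < k either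
        have hx1 : pvThr m k f x = none := by unfold pvThr; rw [if_neg hk]
        rw [hx1] at h
        obtain ⟨y, hy, hfy⟩ := List.exists_of_findSome?_eq_some h
        have hky : pvKey m y < k := by
          by_contra hc
          unfold pvThr at hfy
          rw [if_neg hc] at hfy
          simp at hfy
        have hfy' : f y ≠ none := by
          unfold pvThr at hfy
          rw [if_pos hky] at hfy
          simp [hfy]
        have := hx y hy hfx hfy'
        omega

-- Lemma B2: nothing found below k, the unique key-k source s becomes the first (and only) hit
theorem pv_thr_succ_fresh {m : Nat} {k : Int} {f : Int × Int → Option Int} {l : List (Int × Int)}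
    {s : Int × Int}
    (hs : s ∈ l) (hks : pvKey m s = k)
    (huniq : ∀ x ∈ l, pvKey m x = k → f x ≠ none → x = s)
    (h : l.findSome? (pvThr m k f) = none) :
    l.findSome? (pvThr m (k + 1) f) = f s := by
  have hall : ∀ x ∈ l, pvThr m k f x = none := List.findSome?_eq_none_iff.mp h
  have key1 : ∀ x ∈ l, pvThr m (k + 1) f x = if pvKey m x = k then f x else none := by
    intro x hx
    have := hall x hx
    unfold pvThr at this ⊢
    split_ifs with h1 h2 h2
    · rfl
    · split_ifs at this with h3
      · exact this
      · omega
    · omega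
    · rfl
  clear h hall
  induction l with
  | nil => simp at hs
  | cons x t ih =>
    simp only [List.findSome?_cons]
    by_cases hxs : x = s
    · subst hxs
      rw [key1 x List.mem_cons_self, if_pos hks]
      cases hfx : f x with
      | some w => rfl
      | none =>
        -- every later hit with key k is x itself, whose value is none
        have : ∀ y ∈ t, pvThr m (k + 1) f y = none := by
          intro y hy
          rw [key1 y (List.mem_cons_of_mem _ hy)]
          split_ifs with h1
          · by_cases hfy : f y = none
            · exact hfy
            · have := huniq y (List.mem_cons_of_mem _ hy) h1 hfy
              subst this; exact hfx
          · rfl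
        rw [List.findSome?_eq_none_iff.mpr this]
    · rw [key1 x List.mem_cons_self]
      have hx1 : (if pvKey m x = k then f x else none) = none := by
        split_ifs with h1
        · by_cases hfx : f x = none
          · exact hfx
          · exact absurd (huniq x List.mem_cons_self h1 hfx) hxs
        · rfl
      rw [hx1]
      have hs' : s ∈ t := by cases List.mem_cons.mp hs with
        | inl h => exact absurd h.symm hxs
        | inr h => exact h
      exact ih hs' (fun y hy hky hfy => huniq y (List.mem_cons_of_mem _ hy) hky hfy)
        (fun y hy => key1 y (List.mem_cons_of_mem _ hy))


theorem pv_getD_set {α : Type} (l : List α) (i j : Nat) (v d : α) :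
    (l.set i v).getD j d = if i = j ∧ i < l.length then v else l.getD j d := by
  rw [List.getD_eq_getElem?_getD, List.getD_eq_getElem?_getD, List.getElem?_set]
  by_cases h1 : i = j
  · subst h1
    by_cases h2 : i < l.length
    · simp [h2]
    · simp [h2]
  · simp [h1]

theorem pv_writeA_length (n m : Nat) (out : List (List Int)) (nr nc v : Int) :
    (pvWriteA n m out nr nc v).length = out.length := by
  unfold pvWriteA; split_ifs <;> simp

theorem pv_writeA_rowlen (n m : Nat) (out : List (List Int)) (nr nc v : Int) (i : Nat) :
    ((pvWriteA n m out nr nc v).getD i []).length = ((out.getD i []).length) := by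
  unfold pvWriteA
  split_ifs with h
  · rw [pv_getD_set]
    split_ifs with h1
    · rw [h1.1, List.length_set]
    · rfl
  · rfl

theorem pv_writeA_getD {n : Nat} (m : Nat) {out : List (List Int)} (nr nc v : Int)
    (hlen : out.length = n) (hrows : ∀ i : Nat, i < n → m ≤ (out.getD i []).length)
    (i j : Nat) :
    ((pvWriteA n m out nr nc v).getD i []).getD j 0 =
      if nr = (i : Int) ∧ nc = (j : Int) ∧ i < n ∧ j < m ∧ (out.getD i []).getD j 0 = 0
      then v else (out.getD i []).getD j 0 := by
  unfold pvWriteA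
  split_ifs with h hc hc
  · -- write executed, (i, j) is the target
    obtain ⟨h1, h2, h3, h4, h5⟩ := hc
    have hi : nr.toNat = i := by omega
    have hj : nc.toNat = j := by omega
    have hlen2 : nc.toNat < (out.getD nr.toNat []).length := by
      rw [hi]; have := hrows i (by omega); omega
    rw [pv_getD_set, if_pos ⟨hi, by omega⟩, pv_getD_set, if_pos ⟨hj, hlen2⟩]
  · -- write executed, (i, j) untouched
    rw [pv_getD_set]
    split_ifs with h1
    · rw [h1.1, pv_getD_set]
      have : ¬(nc.toNat = j ∧ nc.toNat < (out.getD i []).length) := by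
        intro hh
        exact hc ⟨by omega, by omega, by omega, by omega, by rw [← h1.1, ← hh.1]; exact h.2.2.2.2⟩
      rw [if_neg this]
    · rfl
  · -- write skipped but claim says it fired: impossible
    obtain ⟨h1, h2, h3, h4, h5⟩ := hc
    exact absurd ⟨by omega, by omega, by omega, by omega, by
      have hi : nr.toNat = i := by omega
      have hj : nc.toNat = j := by omega
      rw [hi, hj]; exact h5⟩ h
  · rfl


-- orthogonal / diagonal adjacency of target (i, j) to source (r, c)
abbrev pvOA (r c i j : Nat) : Prop :=
  ((i : Int) = (r : Int) - 1 ∧ (j : Int) = (c : Int)) ∨ ((i : Int) = (r : Int) + 1 ∧ (j : Int) = (c : Int)) ∨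
  ((i : Int) = (r : Int) ∧ (j : Int) = (c : Int) - 1) ∨ ((i : Int) = (r : Int) ∧ (j : Int) = (c : Int) + 1)

abbrev pvDA (r c i j : Nat) : Prop :=
  ((i : Int) = (r : Int) - 1 ∨ (i : Int) = (r : Int) + 1) ∧ ((j : Int) = (c : Int) - 1 ∨ (j : Int) = (c : Int) + 1)

theorem pv_orthofold_getD {n : Nat} (m : Nat) {out : List (List Int)} (r c : Nat) (v : Int)
    (hlen : out.length = n) (hrows : ∀ i : Nat, i < n → m ≤ (out.getD i []).length) (i j : Nat) :
    (((pvOrtho.foldl (fun o d => pvWriteA n m o ((r : Int) + d.1) ((c : Int) + d.2) v) out).getD i []).getD j 0)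
      = if pvOA r c i j ∧ i < n ∧ j < m ∧ (out.getD i []).getD j 0 = 0 then v
        else (out.getD i []).getD j 0 := by
  simp only [pvOrtho, List.foldl_cons, List.foldl_nil]
  have hlen1 := pv_writeA_length n m out ((r:Int) + (-1)) ((c:Int) + 0) v
  have hrow1 := pv_writeA_rowlen n m out ((r:Int) + (-1)) ((c:Int) + 0) v
  set o1 := pvWriteA n m out ((r:Int) + (-1)) ((c:Int) + 0) v with ho1
  have hlen1' : o1.length = n := by rw [hlen1, hlen]
  have hrow1' : ∀ i : Nat, i < n → m ≤ (o1.getD i []).length := fun i hi => (hrow1 i) ▸ hrows i hi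
  have hlen2 := pv_writeA_length n m o1 ((r:Int) + 1) ((c:Int) + 0) v
  have hrow2 := pv_writeA_rowlen n m o1 ((r:Int) + 1) ((c:Int) + 0) v
  set o2 := pvWriteA n m o1 ((r:Int) + 1) ((c:Int) + 0) v with ho2
  have hlen2' : o2.length = n := by rw [hlen2, hlen1']
  have hrow2' : ∀ i : Nat, i < n → m ≤ (o2.getD i []).length := fun i hi => (hrow2 i) ▸ hrow1' i hi
  have hlen3 := pv_writeA_length n m o2 ((r:Int) + 0) ((c:Int) + (-1)) v
  have hrow3 := pv_writeA_rowlen n m o2 ((r:Int) + 0) ((c:Int) + (-1)) v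
  set o3 := pvWriteA n m o2 ((r:Int) + 0) ((c:Int) + (-1)) v with ho3
  have hlen3' : o3.length = n := by rw [hlen3, hlen2']
  have hrow3' : ∀ i : Nat, i < n → m ≤ (o3.getD i []).length := fun i hi => (hrow3 i) ▸ hrow2' i hi
  rw [pv_writeA_getD m _ _ v hlen3' hrow3' i j, ho3,
      pv_writeA_getD m _ _ v hlen2' hrow2' i j, ho2,
      pv_writeA_getD m _ _ v hlen1' hrow1' i j, ho1,
      pv_writeA_getD m _ _ v hlen hrows i j]
  unfold pvOA
  split_ifs <;> omega

theorem pv_diagfold_getD {n : Nat} (m : Nat) {out : List (List Int)} (r c : Nat) (v : Int)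
    (hlen : out.length = n) (hrows : ∀ i : Nat, i < n → m ≤ (out.getD i []).length) (i j : Nat) :
    (((pvDiag.foldl (fun o d => pvWriteA n m o ((r : Int) + d.1) ((c : Int) + d.2) v) out).getD i []).getD j 0)
      = if pvDA r c i j ∧ i < n ∧ j < m ∧ (out.getD i []).getD j 0 = 0 then v
        else (out.getD i []).getD j 0 := by
  simp only [pvDiag, List.foldl_cons, List.foldl_nil]
  have hlen1 := pv_writeA_length n m out ((r:Int) + (-1)) ((c:Int) + (-1)) v
  have hrow1 := pv_writeA_rowlen n m out ((r:Int) + (-1)) ((c:Int) + (-1)) v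
  set o1 := pvWriteA n m out ((r:Int) + (-1)) ((c:Int) + (-1)) v with ho1
  have hlen1' : o1.length = n := by rw [hlen1, hlen]
  have hrow1' : ∀ i : Nat, i < n → m ≤ (o1.getD i []).length := fun i hi => (hrow1 i) ▸ hrows i hi
  have hlen2 := pv_writeA_length n m o1 ((r:Int) + (-1)) ((c:Int) + 1) v
  have hrow2 := pv_writeA_rowlen n m o1 ((r:Int) + (-1)) ((c:Int) + 1) v
  set o2 := pvWriteA n m o1 ((r:Int) + (-1)) ((c:Int) + 1) v with ho2
  have hlen2' : o2.length = n := by rw [hlen2, hlen1']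
  have hrow2' : ∀ i : Nat, i < n → m ≤ (o2.getD i []).length := fun i hi => (hrow2 i) ▸ hrow1' i hi
  have hlen3 := pv_writeA_length n m o2 ((r:Int) + 1) ((c:Int) + (-1)) v
  have hrow3 := pv_writeA_rowlen n m o2 ((r:Int) + 1) ((c:Int) + (-1)) v
  set o3 := pvWriteA n m o2 ((r:Int) + 1) ((c:Int) + (-1)) v with ho3
  have hlen3' : o3.length = n := by rw [hlen3, hlen2']
  have hrow3' : ∀ i : Nat, i < n → m ≤ (o3.getD i []).length := fun i hi => (hrow3 i) ▸ hrow2' i hi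
  rw [pv_writeA_getD m _ _ v hlen3' hrow3' i j, ho3,
      pv_writeA_getD m _ _ v hlen2' hrow2' i j, ho2,
      pv_writeA_getD m _ _ v hlen1' hrow1' i j, ho1,
      pv_writeA_getD m _ _ v hlen hrows i j]
  unfold pvDA
  split_ifs <;> omega

theorem pv_stepA_length (grid : List (List Int)) (n m : Nat) (out : List (List Int)) (r c : Nat) :
    (pvStepA grid n m out r c).length = out.length := by
  unfold pvStepA
  split_ifs <;> simp [pvOrtho, pvDiag, pv_writeA_length]

theorem pv_stepA_rowlen (grid : List (List Int)) (n m : Nat) (out : List (List Int)) (r c : Nat) (i : Nat) :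
    ((pvStepA grid n m out r c).getD i []).length = (out.getD i []).length := by
  unfold pvStepA
  split_ifs <;> simp only [pvOrtho, pvDiag, List.foldl_cons, List.foldl_nil, pv_writeA_rowlen]

theorem pv_stepA_getD {n : Nat} (m : Nat) {grid out : List (List Int)} (r c : Nat)
    (hlen : out.length = n) (hrows : ∀ i : Nat, i < n → m ≤ (out.getD i []).length) (i j : Nat) :
    ((pvStepA grid n m out r c).getD i []).getD j 0 =
      if ((grid.getD r []).getD c 0 = 1 ∧ pvOA r c i j ∨ (grid.getD r []).getD c 0 = 2 ∧ pvDA r c i j)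
         ∧ i < n ∧ j < m ∧ (out.getD i []).getD j 0 = 0
      then (if (grid.getD r []).getD c 0 = 1 then 7 else 4)
      else (out.getD i []).getD j 0 := by
  unfold pvStepA
  by_cases hg1 : (grid.getD r []).getD c 0 = 1
  · rw [if_pos hg1, pv_orthofold_getD m r c 7 hlen hrows i j, hg1]
    norm_num
  · rw [if_neg hg1]
    by_cases hg2 : (grid.getD r []).getD c 0 = 2
    · rw [if_pos hg2, pv_diagfold_getD m r c 4 hlen hrows i j, hg2]
      norm_num
    · rw [if_neg hg2]
      have hcond : ¬(((grid.getD r []).getD c 0 = 1 ∧ pvOA r c i j ∨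
          (grid.getD r []).getD c 0 = 2 ∧ pvDA r c i j) ∧
          i < n ∧ j < m ∧ (out.getD i []).getD j 0 = 0) := by
        rintro ⟨h | h, -⟩
        exacts [hg1 h.1, hg2 h.1]
      rw [if_neg hcond]


theorem pv_key_inj {m : Nat} {a b a' b' : Int} (hb : 0 ≤ b) (hb2 : b < (m : Int))
    (hb' : 0 ≤ b') (hb2' : b' < (m : Int))
    (h : a * m + b = a' * m + b') : a = a' ∧ b = b' := by
  have hd : (a - a') * (m : Int) = b' - b := by linear_combination h
  have ha : a = a' := by
    rcases lt_trichotomy a a' with hlt | heq | hgt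
    · exfalso
      have h1 : a - a' ≤ -1 := by omega
      have h2 : (a - a') * (m : Int) ≤ (-1) * (m : Int) :=
        mul_le_mul_of_nonneg_right h1 (by exact_mod_cast Nat.zero_le m)
      rw [hd] at h2
      omega
    · exact heq
    · exfalso
      have h1 : 1 ≤ a - a' := by omega
      have h2 : 1 * (m : Int) ≤ (a - a') * (m : Int) :=
        mul_le_mul_of_nonneg_right h1 (by exact_mod_cast Nat.zero_le m)
      rw [hd] at h2
      omega
  exact ⟨ha, by rw [ha] at h; omega⟩

theorem pv_key_eq_src {grid : List (List Int)} {n m : Nat} {r c : Nat} {x : Int × Int} {rs cs : Nat}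
    (_hr : rs < n) (hc : cs < m)
    (hk : pvKey m x = (rs : Int) * m + cs)
    (hhit : pvHit grid n m r c x ≠ none) : x = ((rs : Int), (cs : Int)) := by
  obtain ⟨h1, h2, h3, h4⟩ := pv_checkB_ne_none hhit
  unfold pvKey at hk
  obtain ⟨ha, hb⟩ := pv_key_inj h3 h4 (by exact_mod_cast Nat.zero_le cs) (by exact_mod_cast hc) hk
  exact Prod.ext_iff.mpr ⟨ha, hb⟩

theorem pv_mem_L9 (r c i j : Nat) :
    (((r : Int), (c : Int)) ∈ pvL9 (i : Int) (j : Int)) ↔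
      ((r : Int) ≤ (i : Int) + 1 ∧ (i : Int) ≤ (r : Int) + 1 ∧
       (c : Int) ≤ (j : Int) + 1 ∧ (j : Int) ≤ (c : Int) + 1) := by
  rw [pv_L9_eq]
  simp only [List.mem_cons, List.not_mem_nil, or_false, Prod.mk.injEq]
  omega

theorem pv_L9_pairwise (grid : List (List Int)) (n m : Nat) (r c : Nat) :
    (pvL9 (r : Int) (c : Int)).Pairwise (fun x y =>
      pvHit grid n m r c x ≠ none → pvHit grid n m r c y ≠ none → pvKey m x < pvKey m y) := by
  rw [pv_L9_eq, List.pairwise_iff_getElem]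
  intro a b ha hb hab
  simp only [List.length_cons, List.length_nil] at ha hb
  interval_cases a <;> interval_cases b <;>
    simp only [List.getElem_cons_zero, List.getElem_cons_succ] <;>
    (first
      | omega
      | (intro hx hy
         obtain ⟨x1, x2, x3, x4⟩ := pv_checkB_ne_none hx
         obtain ⟨y1, y2, y3, y4⟩ := pv_checkB_ne_none hy
         unfold pvKey
         simp only
         nlinarith))

theorem pv_scan_values {grid : List (List Int)} {n m : Nat} {r c : Nat} {L : List (Int × Int)}
    {k : Int} {v : Int}
    (h : L.findSome? (pvThr m k (pvHit grid n m r c)) = some v) : v = 7 ∨ v = 4 := by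
  obtain ⟨x, hx, hfx⟩ := List.exists_of_findSome?_eq_some h
  unfold pvThr at hfx
  split_ifs at hfx with h1
  · unfold pvHit pvCheckB at hfx
    split_ifs at hfx
    all_goals first
      | (left; exact (Option.some.inj hfx).symm)
      | (right; exact (Option.some.inj hfx).symm)

-- evaluation of B's check at an in-bounds source
theorem pv_hit_eval {grid : List (List Int)} {n m : Nat} (r c i j : Nat)
    (hr : r < n) (hc : c < m) :
    pvHit grid n m i j ((r : Int), (c : Int)) =
      if (grid.getD r []).getD c 0 = 1 ∧ ((r : Int) = i ∨ (c : Int) = j) ∧ ¬((r : Int) = i ∧ (c : Int) = j)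
      then some 7
      else if (grid.getD r []).getD c 0 = 2 ∧ (r : Int) ≠ i ∧ (c : Int) ≠ j then some 4
      else none := by
  unfold pvHit pvCheckB
  simp only [Int.toNat_natCast]
  by_cases hcent : (r : Int) = (i : Int) ∧ (c : Int) = (j : Int)
  · rw [if_neg (fun hcond => hcond.2.2.2.2 hcent)]
    rw [if_neg (by tauto), if_neg (by rintro ⟨-, hne, -⟩; exact hne hcent.1)]
  · rw [if_pos ⟨by omega, by omega, by omega, by omega, hcent⟩]
    simp
    split_ifs <;> first | rfl | omega


theorem pv_inv_step {grid : List (List Int)} {n m : Nat}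
    (hn : grid.length = n)
    (hpre : ∀ i : Nat, i < n → m ≤ (grid.getD i []).length)
    {r c : Nat} (hr : r < n) (hc : c < m) {out : List (List Int)}
    (hinv : pvInv grid n m ((r : Int) * m + c) out) :
    pvInv grid n m ((r : Int) * m + c + 1) (pvStepA grid n m out r c) := by
  obtain ⟨h1, h2, h3, h4⟩ := hinv
  have hlen : out.length = n := by rw [h1, hn]
  have hrows : ∀ i : Nat, i < n → m ≤ (out.getD i []).length := fun i hi => (h2 i) ▸ hpre i hi
  refine ⟨by rw [pv_stepA_length, h1], fun i => by rw [pv_stepA_rowlen, h2], ?_, ?_⟩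
  swap
  · -- cells outside the n×m region are never written
    intro i j hnij
    rw [pv_stepA_getD m r c hlen hrows i j,
        if_neg (fun hcond => hnij ⟨hcond.2.1, hcond.2.2.1⟩)]
    exact h4 i j hnij
  intro i j hi hj
  rw [pv_stepA_getD m r c hlen hrows i j]
  have he0 := h3 i j hi hj
  have hks : pvKey m ((r : Int), (c : Int)) = (r : Int) * m + c := by unfold pvKey; simp
  have huniq : ∀ x ∈ pvL9 (i : Int) (j : Int), pvKey m x = (r : Int) * m + c →
      pvHit grid n m i j x ≠ none → x = ((r : Int), (c : Int)) :=
    fun x _ hkx hfx => pv_key_eq_src hr hc hkx hfx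
  have hhits := pv_hit_eval (grid := grid) r c i j hr hc
  by_cases hg : (grid.getD i []).getD j 0 = 0
  case neg =>
    -- this cell keeps its nonzero grid value on both sides
    have hev : (out.getD i []).getD j 0 = (grid.getD i []).getD j 0 := by
      rw [he0]; unfold pvValK; simp only [if_neg hg]
    rw [if_neg (fun hcond => hg (hev ▸ hcond.2.2.2)), hev]
    unfold pvValK; simp only [if_neg hg]
  case pos =>
    unfold pvValK at he0 ⊢
    simp only [if_pos hg] at he0 ⊢
    by_cases hbox : ((r : Int) ≤ (i : Int) + 1 ∧ (i : Int) ≤ (r : Int) + 1 ∧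
        (c : Int) ≤ (j : Int) + 1 ∧ (j : Int) ≤ (c : Int) + 1)
    case neg =>
      -- source is not in the target's neighborhood: nothing changes on either side
      have hmem : ¬(((r : Int), (c : Int)) ∈ pvL9 (i : Int) (j : Int)) := by
        rw [pv_mem_L9]; exact hbox
      have hOA : ¬ pvOA r c i j := by unfold pvOA; omega
      have hDA : ¬ pvDA r c i j := by unfold pvDA; omega
      rw [if_neg (by rintro ⟨h5 | h5, -⟩; exacts [hOA h5.2, hDA h5.2])]
      rw [pv_thr_succ_none (fun x hx hkx => by
        by_contra hfx
        exact hmem (huniq x hx hkx hfx ▸ hx))]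
      exact he0
    case pos =>
      have hmem : ((r : Int), (c : Int)) ∈ pvL9 (i : Int) (j : Int) := (pv_mem_L9 r c i j).mpr hbox
      cases hfs : pvHit grid n m i j ((r : Int), (c : Int)) with
      | none =>
        -- source contributes nothing here: A writes nothing, B's scan unchanged
        have hcond : ¬(((grid.getD r []).getD c 0 = 1 ∧ pvOA r c i j ∨
            (grid.getD r []).getD c 0 = 2 ∧ pvDA r c i j) ∧
            i < n ∧ j < m ∧ (out.getD i []).getD j 0 = 0) := by
          rintro ⟨h5 | h5, -⟩
          · rw [hhits, if_pos ⟨h5.1, by unfold pvOA at h5; omega, by unfold pvOA at h5; omega⟩] at hfs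
            simp at hfs
          · rw [hhits, if_neg (by rintro ⟨-, hd, -⟩; unfold pvDA at h5; omega),
                if_pos ⟨h5.1, by unfold pvDA at h5; omega, by unfold pvDA at h5; omega⟩] at hfs
            simp at hfs
        rw [if_neg hcond]
        rw [pv_thr_succ_none (fun x hx hkx => by
          by_contra hfx
          rw [huniq x hx hkx hfx] at hfx
          exact hfx hfs)]
        exact he0
      | some w =>
        -- source does hit this cell, with value w ∈ {7, 4}
        have hAcond : ((grid.getD r []).getD c 0 = 1 ∧ pvOA r c i j ∧ w = 7) ∨
            ((grid.getD r []).getD c 0 = 2 ∧ pvDA r c i j ∧ w = 4) := by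
          rw [hhits] at hfs
          split_ifs at hfs with t1 t2
          · exact Or.inl ⟨t1.1, by unfold pvOA; omega, (Option.some.inj hfs).symm⟩
          · exact Or.inr ⟨t2.1, by unfold pvDA; omega, (Option.some.inj hfs).symm⟩
        by_cases hz : (out.getD i []).getD j 0 = 0
        case pos =>
          -- first writer: A writes w; B's scan now finds the fresh source
          have hnone : (pvL9 (i : Int) (j : Int)).findSome?
              (pvThr m ((r : Int) * m + c) (pvHit grid n m i j)) = none := by
            cases hres : (pvL9 (i : Int) (j : Int)).findSome?
                (pvThr m ((r : Int) * m + c) (pvHit grid n m i j)) with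
            | none => rfl
            | some v0 =>
              rw [he0, hres] at hz
              rcases pv_scan_values hres with hv | hv <;> simp [hv] at hz
          rw [if_pos ⟨by
                rcases hAcond with ⟨hga, hoa, -⟩ | ⟨hga, hda, -⟩
                exacts [Or.inl ⟨hga, hoa⟩, Or.inr ⟨hga, hda⟩], hi, hj, hz⟩,
              pv_thr_succ_fresh hmem hks huniq hnone, hfs]
          rcases hAcond with ⟨hga, -, hw⟩ | ⟨hga, -, hw⟩
          · rw [if_pos hga, hw]; rfl
          · rw [if_neg (by rw [hga]; norm_num), hw]; rfl
        case neg =>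
          -- already written earlier: A skips, B's earlier first hit survives
          have hsome : ∃ v0, (pvL9 (i : Int) (j : Int)).findSome?
              (pvThr m ((r : Int) * m + c) (pvHit grid n m i j)) = some v0 := by
            cases hres : (pvL9 (i : Int) (j : Int)).findSome?
                (pvThr m ((r : Int) * m + c) (pvHit grid n m i j)) with
            | none => rw [he0, hres] at hz; simp at hz
            | some v0 => exact ⟨v0, rfl⟩
          obtain ⟨v0, hres⟩ := hsome
          rw [if_neg (fun hcond => hz hcond.2.2.2),
              pv_thr_succ_some (pv_L9_pairwise grid n m i j) hres, he0, hres]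


theorem pv_inv_zero (grid : List (List Int)) (n m : Nat) : pvInv grid n m 0 grid := by
  refine ⟨rfl, fun i => rfl, ?_, fun i j _ => rfl⟩
  intro i j hi hj
  unfold pvValK
  by_cases hg : (grid.getD i []).getD j 0 = 0
  · simp only [if_pos hg]
    have hnone : (pvL9 (i : Int) (j : Int)).findSome?
        (pvThr m 0 (pvHit grid n m i j)) = none := by
      apply List.findSome?_eq_none_iff.mpr
      intro x hx
      unfold pvThr
      split_ifs with h1
      · by_contra hfx
        obtain ⟨b1, b2, b3, b4⟩ := pv_checkB_ne_none hfx
        unfold pvKey at h1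
        nlinarith
      · rfl
    rw [hnone, hg]
    rfl
  · simp only [if_neg hg]

theorem pv_inner_fold {grid : List (List Int)} {n m : Nat}
    (hn : grid.length = n)
    (hpre : ∀ i : Nat, i < n → m ≤ (grid.getD i []).length)
    (r : Nat) (hr : r < n) :
    ∀ t : Nat, t ≤ m → ∀ out, pvInv grid n m ((r : Int) * m) out →
      pvInv grid n m ((r : Int) * m + t)
        ((List.range t).foldl (fun o c => pvStepA grid n m o r c) out) := by
  intro t
  induction t with
  | zero => intro _ out h; simpa using h
  | succ t ih =>
    intro ht out h
    rw [List.range_succ, List.foldl_append, List.foldl_cons, List.foldl_nil]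
    have hstep := pv_inv_step hn hpre hr (show t < m by omega) (ih (by omega) out h)
    have hcast : (r : Int) * m + ((t : Nat) + 1 : Nat) = (r : Int) * m + t + 1 := by
      push_cast; ring
    rw [hcast]
    exact hstep

theorem pv_outer_fold {grid : List (List Int)} {n m : Nat}
    (hn : grid.length = n)
    (hpre : ∀ i : Nat, i < n → m ≤ (grid.getD i []).length) :
    ∀ t : Nat, t ≤ n →
      pvInv grid n m ((t : Int) * m)
        ((List.range t).foldl
          (fun out r => (List.range m).foldl (fun o c => pvStepA grid n m o r c) out) grid) := by
  intro t
  induction t with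
  | zero => intro _; simpa using pv_inv_zero grid n m
  | succ t ih =>
    intro ht
    rw [List.range_succ, List.foldl_append, List.foldl_cons, List.foldl_nil]
    have hstep := pv_inner_fold hn hpre t (by omega) m le_rfl _ (ih (by omega))
    have hcast : ((t : Nat) + 1 : Nat) * (m : Int) = (t : Int) * m + m := by
      push_cast; ring
    rw [hcast]
    exact hstep

theorem pv_A_inv (grid : List (List Int))
    (hpre : ∀ i : Nat, i < grid.length → pvM grid ≤ (grid.getD i []).length) :
    pvInv grid grid.length (pvM grid) ((grid.length : Int) * (pvM grid)) (transform grid) := by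
  exact pv_outer_fold rfl hpre grid.length le_rfl

theorem pv_alt_length (grid : List (List Int)) : (transform_alt grid).length = grid.length := by
  unfold transform_alt
  rw [List.length_map, PySem.List.length_enumerate]

theorem pv_foldset_len (row : List Int) (g : Nat → Int) (t : Nat) :
    ((List.range t).foldl (fun new c => if row.getD c 0 = 0 then new.set c (g c) else new) row).length
      = row.length := by
  induction t with
  | zero => rfl
  | succ t ih =>
    rw [List.range_succ, List.foldl_append, List.foldl_cons, List.foldl_nil]
    split_ifs
    · rw [List.length_set]; exact ih
    · exact ih

theorem pv_foldset_getD (row : List Int) (g : Nat → Int) (t j : Nat) :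
    ((List.range t).foldl (fun new c => if row.getD c 0 = 0 then new.set c (g c) else new) row).getD j 0
      = if j < t ∧ j < row.length ∧ row.getD j 0 = 0 then g j else row.getD j 0 := by
  induction t with
  | zero => simp
  | succ t ih =>
    rw [List.range_succ, List.foldl_append, List.foldl_cons, List.foldl_nil]
    by_cases hTz : row.getD t 0 = 0
    · rw [if_pos hTz, pv_getD_set]
      by_cases hjt : j = t
      · subst hjt
        by_cases hlen : j < row.length
        · rw [if_pos ⟨rfl, by rw [pv_foldset_len]; exact hlen⟩,
              if_pos ⟨by omega, hlen, hTz⟩]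
        · rw [if_neg (by rw [pv_foldset_len]; omega), ih,
              if_neg (by omega), if_neg (by omega)]
      · rw [if_neg (fun h => hjt h.1.symm), ih]
        split_ifs <;> first | rfl | omega
    · rw [if_neg hTz, ih]
      by_cases hjt : j = t
      · subst hjt
        rw [if_neg (by omega), if_neg (by rintro ⟨-, -, h⟩; exact hTz h)]
      · split_ifs <;> first | rfl | omega

theorem pv_alt_row (grid : List (List Int)) (i : Nat) (hi : i < grid.length) :
    (transform_alt grid)[i]'(by rw [pv_alt_length]; exact hi) =
      (List.range (pvM grid)).foldl
        (fun new c => if (grid[i]'hi).getD c 0 = 0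
          then new.set c (pvCandidate grid grid.length (pvM grid) ((i : Int)) ((c : Int)))
          else new)
        (grid[i]'hi) := by
  unfold transform_alt
  rw [List.getElem_map, PySem.List.getElem_enumerate]
  simp

theorem pv_cand_eq (grid : List (List Int)) {n m : Nat} (i j : Nat)
    (hg : (grid.getD i []).getD j 0 = 0) :
    pvValK grid n m ((n : Int) * m) i j = pvCandidate grid n m (i : Int) (j : Int) := by
  unfold pvValK pvCandidate
  simp only [if_pos hg]
  congr 1
  apply pv_findSome?_congr_mem
  intro x hx
  unfold pvThr
  split_ifs with h1
  · rfl
  · by_contra hne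
    have hfx : pvHit grid n m i j x ≠ none := fun hfn => hne hfn.symm
    obtain ⟨b1, b2, b3, b4⟩ := pv_checkB_ne_none hfx
    unfold pvKey at h1
    have hx1 : x.1 ≤ (n : Int) - 1 := by omega
    have : x.1 * (m : Int) ≤ ((n : Int) - 1) * m :=
      mul_le_mul_of_nonneg_right hx1 (by exact_mod_cast Nat.zero_le m)
    nlinarith

-- ===== VERDICT (by name: the statement is the Claim_ definition above) =====
theorem transform_spec : Claim_equal_transform := by
  unfold Claim_equal_transform
  intro grid _hdom hpre
  unfold Spec_transform
  have hpre' : ∀ i : Nat, i < grid.length → pvM grid ≤ (grid.getD i []).length := by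
    intro i hi
    have hmem : grid.getD i [] ∈ grid := by
      rw [List.getD_eq_getElem _ _ hi]
      exact List.getElem_mem _
    exact hpre _ hmem
  obtain ⟨a1, a2, a3, a4⟩ := pv_A_inv grid hpre'
  apply List.ext_getElem
  · rw [a1, pv_alt_length]
  intro i h1 h2
  have hi : i < grid.length := by rw [a1] at h1; exact h1
  rw [pv_alt_row grid i hi]
  have hArow : (transform grid)[i] = (transform grid).getD i [] := (List.getD_eq_getElem _ _ h1).symm
  have hrowlen : ((transform grid).getD i []).length = (grid[i]'hi).length := by
    rw [a2 i, List.getD_eq_getElem _ _ hi]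
  apply List.ext_getElem
  · rw [← hArow] at hrowlen
    rw [hrowlen, pv_foldset_len]
  intro j hj1 hj2
  have hjrow : j < (grid[i]'hi).length := by rw [← hArow] at hrowlen; rw [hrowlen] at hj1; exact hj1
  have hgume : (grid.getD i []) = grid[i]'hi := List.getD_eq_getElem _ _ hi
  -- move to getD form on both sides
  rw [← List.getD_eq_getElem ((transform grid)[i]) 0 hj1, hArow,
      ← List.getD_eq_getElem _ 0 hj2, pv_foldset_getD]
  by_cases hjm : j < pvM grid
  · -- inside the written region
    have hAij := a3 i j hi hjm
    rw [hAij]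
    by_cases hg : (grid.getD i []).getD j 0 = 0
    · rw [pv_cand_eq grid i j hg,
          if_pos ⟨hjm, hjrow, by rw [← hgume]; exact hg⟩]
    · rw [if_neg (fun h => hg (by rw [hgume]; exact h.2.2))]
      unfold pvValK
      rw [if_neg hg, hgume]
  · -- ragged columns beyond m: both sides keep the grid value
    rw [a4 i j (fun h => hjm h.2), if_neg (by omega), hgume]
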